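-- pv_equiv track=rewrite | github.com/littelfuse-ssamuel/open-webui | backend/open_webui/excel/dfmea_formatter.py | _insert_littelfuse_separators
-- ===== SOURCE A (Python) =====
-- from typing import Any
--
-- def _insert_littelfuse_separators(records: list[dict[str, Any]]) -> list[dict[str, Any]]:
--     records_with_separators: list[dict[str, Any]] = []
--     current_item = None
--
--     for record in records:
--         item_function = str(record.get("Item / Function", "") or "")
--         if item_function and item_function != current_item:
--             if current_item is not None:
--                 records_with_separators.append({"Item / Function": "SEPARATOR_ROW"})
--             current_item = item_function
--         records_with_separators.append(record)
--
--     return records_with_separators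
-- ===== SOURCE B (Python) =====
-- def _insert_littelfuse_separators(records):
--     # Phase 1: forward-fill group keys (None until the first non-empty item).
--     keyed = []
--     key = None
--     for record in records:
--         value = str(record.get("Item / Function", "") or "")
--         if value:
--             key = value
--         keyed.append((key, record))
--     # Phase 2+3: walk maximal runs of equal key, inserting a separator before
--     # a run whenever the previous run's key was not None.
--     out = []
--     prev_key = None
--     i = 0
--     n = len(keyed)
--     while i < n:
--         k = keyed[i][0]
--         j = i + 1
--         while j < n and keyed[j][0] == k:
--             j += 1
--         if prev_key is not None:
--             out.append({"Item / Function": "SEPARATOR_ROW"})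
--         out.extend(record for _, record in keyed[i:j])
--         prev_key = k
--         i = j
--     return out
-- ===== Notes on version B (the rewrite author's own statement) =====
-- stated objective: alternative
-- what changed: Replaces A's interleaved single-pass state machine with a three-phase pipeline: forward-fill a group key per record, split into maximal runs of equal key, then emit runs with a separator before every run whose predecessor run had a non-None key.
import Mathlib
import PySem

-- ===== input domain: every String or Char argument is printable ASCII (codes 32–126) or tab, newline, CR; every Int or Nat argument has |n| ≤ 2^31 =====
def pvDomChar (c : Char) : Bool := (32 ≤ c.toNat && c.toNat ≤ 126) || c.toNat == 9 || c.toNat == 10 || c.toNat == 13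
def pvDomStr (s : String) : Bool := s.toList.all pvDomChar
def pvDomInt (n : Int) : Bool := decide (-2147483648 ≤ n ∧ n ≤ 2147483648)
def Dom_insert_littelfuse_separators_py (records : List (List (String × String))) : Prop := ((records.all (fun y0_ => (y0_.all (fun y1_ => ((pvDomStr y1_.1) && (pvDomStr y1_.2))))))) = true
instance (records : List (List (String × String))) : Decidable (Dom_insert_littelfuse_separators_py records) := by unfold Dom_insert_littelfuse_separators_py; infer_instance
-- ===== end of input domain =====

-- ===== PORT A =====
-- B restructures A's one-pass state machine into forward-fill keys / split runs / interleave; same O(n) cost.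
-- str(record.get("Item / Function","") or "") is the identity on the str values fixed by the type convention;
-- pvGetD is Python's dict.get on the association list (first match, exact since dict keys are unique).
def pvGetD (d : List (String × String)) (k dflt : String) : String :=
  match d with
  | [] => dflt
  | (k', v) :: rest => if k' == k then v else pvGetD rest k dflt

def insert_littelfuse_separators_py (records : List (List (String × String))) : List (List (String × String)) :=
  (records.foldl
    (fun (st : List (List (String × String)) × Option String) record =>
      let item_function := pvGetD record "Item / Function" ""
      if item_function ≠ "" ∧ some item_function ≠ st.2 then
        let acc := if st.2 ≠ none then st.1 ++ [[("Item / Function", "SEPARATOR_ROW")]] else st.1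
        (acc ++ [record], some item_function)
      else
        (st.1 ++ [record], st.2))
    ([], none)).1

-- ===== PORT B =====
-- phase 1 of Source B: the forward-filled (key, record) list, carrying the running key
def pvKeysB (key : Option String) : List (List (String × String)) → List (Option String × List (String × String))
  | [] => []
  | record :: rest =>
    let value := pvGetD record "Item / Function" ""
    let k := if value ≠ "" then some value else key
    (k, record) :: pvKeysB k rest

-- phases 2+3 of Source B: peel the maximal leading run keyed[i:j] sharing the head's key,
-- prefix a separator when the previous run's key was not None
def pvEmitB (prev_key : Option String) (keyed : List (Option String × List (String × String))) :
    List (List (String × String)) :=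
  match keyed with
  | [] => []
  | (k, record) :: rest =>
    let run := rest.takeWhile (fun p => p.1 == k)
    let rest' := rest.dropWhile (fun p => p.1 == k)
    (if prev_key ≠ none then [[("Item / Function", "SEPARATOR_ROW")]] else []) ++
      (record :: run.map Prod.snd) ++ pvEmitB k rest'
  termination_by keyed.length
  decreasing_by
    simp only [List.length_cons]
    exact Nat.lt_succ_of_le (List.length_dropWhile_le _ _)

def insert_littelfuse_separators_py_alt (records : List (List (String × String))) :
    List (List (String × String)) :=
  pvEmitB none (pvKeysB none records)

-- ===== PRECONDITION & SPEC =====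
def Spec_insert_littelfuse_separators_py (records : List (List (String × String))) (out : List (List (String × String))) : Prop := out = insert_littelfuse_separators_py_alt records
instance (records : List (List (String × String))) (out : List (List (String × String))) : Decidable (Spec_insert_littelfuse_separators_py records out) := by unfold Spec_insert_littelfuse_separators_py; infer_instance

-- ===== CLAIM (what is proved, stated in full; the proofs are below) =====
def Claim_equal_insert_littelfuse_separators_py : Prop := ∀ (records : List (List (String × String))), Dom_insert_littelfuse_separators_py records → Spec_insert_littelfuse_separators_py records (insert_littelfuse_separators_py records)

-- ===== LEMMAS AND PROOFS =====

-- A's loop, restated as structural recursion on the remaining records with the current key as state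
def pvARec (cur : Option String) : List (List (String × String)) → List (List (String × String))
  | [] => []
  | record :: rest =>
    let v := pvGetD record "Item / Function" ""
    if v ≠ "" ∧ some v ≠ cur then
      (if cur ≠ none then [[("Item / Function", "SEPARATOR_ROW")]] else []) ++
        record :: pvARec (some v) rest
    else
      record :: pvARec cur rest

theorem pvA_foldl (rs : List (List (String × String)))
    (acc : List (List (String × String))) (cur : Option String) :
    (rs.foldl
      (fun (st : List (List (String × String)) × Option String) record =>
        let item_function := pvGetD record "Item / Function" ""
        if item_function ≠ "" ∧ some item_function ≠ st.2 then
          let acc := if st.2 ≠ none then st.1 ++ [[("Item / Function", "SEPARATOR_ROW")]] else st.1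
          (acc ++ [record], some item_function)
        else
          (st.1 ++ [record], st.2))
      (acc, cur)).1 = acc ++ pvARec cur rs := by
  induction rs generalizing acc cur with
  | nil => simp [pvARec]
  | cons record rest ih =>
    simp only [List.foldl_cons]
    by_cases h : pvGetD record "Item / Function" "" ≠ "" ∧
        some (pvGetD record "Item / Function" "") ≠ cur
    · rw [if_pos h]
      by_cases hc : cur ≠ none
      · rw [if_pos hc, ih, pvARec, if_pos h, if_pos hc]
        simp [List.append_assoc]
      · rw [if_neg hc, ih, pvARec, if_pos h, if_neg hc]
        simp
    · rw [if_neg h, ih, pvARec, if_neg h]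
      simp

-- main bridge: A's recursion equals "emit the leading run keyed `cur` without a separator,
-- then pvEmitB with previous key `cur`"
theorem pvAB (rs : List (List (String × String))) (cur : Option String) :
    pvARec cur rs =
      ((pvKeysB cur rs).takeWhile (fun p => p.1 == cur)).map Prod.snd ++
        pvEmitB cur ((pvKeysB cur rs).dropWhile (fun p => p.1 == cur)) := by
  induction rs generalizing cur with
  | nil => simp [pvARec, pvKeysB, pvEmitB]
  | cons record rest ih =>
    simp only [pvARec, pvKeysB]
    by_cases hv : pvGetD record "Item / Function" "" ≠ ""
    · by_cases hne : some (pvGetD record "Item / Function" "") ≠ cur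
      · -- new group: head key = some v ≠ cur, so the leading run is empty
        rw [if_pos (And.intro hv hne), if_pos hv]
        rw [List.takeWhile_cons_of_neg (by simpa using hne),
            List.dropWhile_cons_of_neg (by simpa using hne)]
        rw [pvEmitB, ih (some (pvGetD record "Item / Function" ""))]
        simp [List.append_assoc]
      · -- same non-empty key: stays inside the current run
        rw [not_not] at hne
        subst hne
        rw [if_neg (by simp), if_pos hv]
        rw [List.takeWhile_cons_of_pos (by simp), List.dropWhile_cons_of_pos (by simp)]
        simp only [List.map_cons, List.cons_append]
        rw [ih]
    · -- empty item: key unchanged, record joins the current run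
      rw [not_not] at hv
      rw [if_neg (by simp [hv]), if_neg (by simp [hv])]
      rw [List.takeWhile_cons_of_pos (by simp), List.dropWhile_cons_of_pos (by simp)]
      simp only [List.map_cons, List.cons_append]
      rw [ih]

-- with prev_key = none, pvEmitB itself emits the leading none-keyed run with no separator
theorem pvEmitB_none (keyed : List (Option String × List (String × String))) :
    pvEmitB none keyed =
      (keyed.takeWhile (fun p => p.1 == (none : Option String))).map Prod.snd ++
        pvEmitB none (keyed.dropWhile (fun p => p.1 == (none : Option String))) := by
  match keyed with
  | [] => simp [pvEmitB]
  | (k, record) :: rest =>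
    by_cases hk : k = none
    · subst hk
      rw [List.takeWhile_cons_of_pos (by simp), List.dropWhile_cons_of_pos (by simp)]
      rw [pvEmitB]
      simp
    · rw [List.takeWhile_cons_of_neg (by simpa using hk),
          List.dropWhile_cons_of_neg (by simpa using hk)]
      simp

-- ===== VERDICT (by name: the statement is the Claim_ definition above) =====
theorem insert_littelfuse_separators_py_spec : Claim_equal_insert_littelfuse_separators_py := by
  intro records _
  unfold Spec_insert_littelfuse_separators_py
  unfold insert_littelfuse_separators_py insert_littelfuse_separators_py_alt
  rw [pvA_foldl records [] none, List.nil_append, pvAB records none]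
  exact (pvEmitB_none _).symm
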